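-- pv_equiv track=rewrite | github.com/yiyangvGOAL/vGOALPRIMA2024 | TS_Generation_V2.py | generated_properties_evaluation
-- ===== SOURCE A (Python) =====
-- def generated_properties_evaluation(beliefs,belief_properties):
--     i=0
--     subset=None
--
--     for b in belief_properties['B']:
--         if set(b)==set(beliefs):
--             return i
--         elif set(b).issubset(set(beliefs)):
--             subset=-i-1
--
--         i=i+1
--
--     return subset
-- ===== SOURCE B (Python) =====
-- def generated_properties_evaluation(beliefs, belief_properties):
--     target = set(beliefs)
--     B = belief_properties['B']
--     for i, b in enumerate(B):
--         if set(b) == target: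
--             return i
--     for i in range(len(B) - 1, -1, -1):
--         if set(B[i]) <= target:
--             return -i - 1
--     return None
-- ===== Notes on version B (the rewrite author's own statement) =====
-- stated objective: alternative
-- what changed: A's single pass carries an index counter and a mutable 'subset' slot updated on every subset hit; B hoists set(beliefs) out of the loop, finds the first exact match in one forward pass with early return, and finds the last subset match by scanning backwards with early return, so no accumulator variable is maintained.
import Mathlib
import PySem

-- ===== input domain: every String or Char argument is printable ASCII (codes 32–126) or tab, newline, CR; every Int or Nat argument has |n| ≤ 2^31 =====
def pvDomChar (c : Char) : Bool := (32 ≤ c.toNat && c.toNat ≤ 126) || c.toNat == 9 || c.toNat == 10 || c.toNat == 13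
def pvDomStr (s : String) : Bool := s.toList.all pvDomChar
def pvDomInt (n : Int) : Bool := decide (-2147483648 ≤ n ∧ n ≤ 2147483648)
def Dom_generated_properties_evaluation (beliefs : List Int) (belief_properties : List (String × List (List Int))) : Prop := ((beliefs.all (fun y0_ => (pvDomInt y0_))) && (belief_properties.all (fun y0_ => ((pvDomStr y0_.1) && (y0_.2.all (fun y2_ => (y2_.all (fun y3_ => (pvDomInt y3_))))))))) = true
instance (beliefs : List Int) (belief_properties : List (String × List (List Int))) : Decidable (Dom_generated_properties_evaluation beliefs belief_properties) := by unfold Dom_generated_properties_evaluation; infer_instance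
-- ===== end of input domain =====

-- B replaces A's single pass with index counter and mutable 'subset' accumulator by a
-- forward early-return scan for the first exact set match followed by a backward
-- early-return scan for the last subset match (objective: alternative decomposition).

-- set(b).issubset(set(beliefs)) on Int lists (exact: set comparison = membership)
def pySubset (b target : List Int) : Bool := b.all (fun x => target.contains x)
-- set(b) == set(beliefs)
def pySetEq (b target : List Int) : Bool := pySubset b target && pySubset target b
-- belief_properties['B'] : first-match dict lookup; KeyError case is excluded by Pre_
def getB (belief_properties : List (String × List (List Int))) : List (List Int) :=
  (((belief_properties.find? (fun p => p.1 == "B")).map (fun p => p.2)).getD [])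

-- ===== PORT A =====
def goA (target : List Int) : List (List Int) → Int → Option Int → Option Int
  | [], _, subset => subset
  | b :: rest, i, subset =>
    if pySetEq b target then some i
    else if pySubset b target then goA target rest (i + 1) (some (-i - 1))
    else goA target rest (i + 1) subset

def generated_properties_evaluation (beliefs : List Int) (belief_properties : List (String × List (List Int))) : Option Int :=
  goA beliefs (getB belief_properties) 0 none

-- ===== PORT B =====
-- first forward loop: first i with set(B[i]) == target
def firstExact (target : List Int) : List (List Int) → Int → Option Int
  | [], _ => none
  | b :: rest, i => if pySetEq b target then some i else firstExact target rest (i + 1)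

-- second loop: i from len-1 down to 0, return -i-1 at the first subset hit
def backScan (target : List Int) : List (List Int) → Int → Option Int
  | [], _ => none
  | b :: rest, i => if pySubset b target then some (-i - 1) else backScan target rest (i - 1)

def generated_properties_evaluation_alt (beliefs : List Int) (belief_properties : List (String × List (List Int))) : Option Int :=
  let B := getB belief_properties
  match firstExact beliefs B 0 with
  | some j => some j
  | none => backScan beliefs B.reverse ((B.length : Int) - 1)

-- ===== PRECONDITION & SPEC =====
-- Pre_ excludes exactly the inputs whose dict has no key 'B', on which A raises KeyError.
def Pre_generated_properties_evaluation (beliefs : List Int) (belief_properties : List (String × List (List Int))) : Prop :=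
  (belief_properties.find? (fun p => p.1 == "B")).isSome = true
instance (beliefs : List Int) (belief_properties : List (String × List (List Int))) : Decidable (Pre_generated_properties_evaluation beliefs belief_properties) := by unfold Pre_generated_properties_evaluation; infer_instance

def pvWitness_generated_properties_evaluation : List Int × (List (String × List (List Int))) :=
  ([1, 2], [("B", [[1], [1, 2], [3]])])

def Spec_generated_properties_evaluation (beliefs : List Int) (belief_properties : List (String × List (List Int))) (out : Option Int) : Prop := out = generated_properties_evaluation_alt beliefs belief_properties
instance (beliefs : List Int) (belief_properties : List (String × List (List Int))) (out : Option Int) : Decidable (Spec_generated_properties_evaluation beliefs belief_properties out) := by unfold Spec_generated_properties_evaluation; infer_instance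

-- ===== CLAIM (what is proved, stated in full; the proofs are below) =====
def Claim_equal_generated_properties_evaluation : Prop := ∀ (beliefs : List Int) (belief_properties : List (String × List (List Int))), Dom_generated_properties_evaluation beliefs belief_properties → Pre_generated_properties_evaluation beliefs belief_properties → Spec_generated_properties_evaluation beliefs belief_properties (generated_properties_evaluation beliefs belief_properties)

-- ===== LEMMAS AND PROOFS =====

-- forward formulation of the 'last subset' accumulator, matching A's loop state
def lastF (target : List Int) : List (List Int) → Int → Option Int → Option Int
  | [], _, acc => acc
  | b :: rest, i, acc => lastF target rest (i + 1) (if pySubset b target then some (-i - 1) else acc)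

theorem backScan_append (t : List Int) (l : List (List Int)) (b : List Int) :
    ∀ j : Int, backScan t (l ++ [b]) j =
      match backScan t l j with
      | some v => some v
      | none => if pySubset b t then some (-(j - l.length) - 1) else none := by
  induction l with
  | nil => intro j; simp [backScan]
  | cons hd tl ih =>
    intro j
    simp only [List.cons_append, backScan]
    by_cases h : pySubset hd t
    · simp [h]
    · simp only [h, if_false, ih (j - 1)]
      have : j - 1 - (tl.length : Int) = j - ((hd :: tl).length : Int) := by
        simp [List.length_cons]; ring
      rw [this]; simp

theorem lastF_eq_backScan (t : List Int) :
    ∀ (bs : List (List Int)) (i : Int) (acc : Option Int),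
      lastF t bs i acc =
        match backScan t bs.reverse (i + bs.length - 1) with
        | some v => some v
        | none => acc := by
  intro bs
  induction bs with
  | nil => intro i acc; simp [lastF, backScan]
  | cons b rest ih =>
    intro i acc
    simp only [lastF, List.reverse_cons]
    rw [ih, backScan_append]
    have h1 : i + 1 + (rest.length : Int) - 1 = i + ((b :: rest).length : Int) - 1 := by
      simp [List.length_cons]; ring
    have h2 : i + ((b :: rest).length : Int) - 1 - (rest.reverse.length : Int) = i := by
      simp [List.length_cons, List.length_reverse]; ring
    rw [h1, h2]
    cases hb : backScan t rest.reverse (i + ((b :: rest).length : Int) - 1) with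
    | some v => simp
    | none => by_cases h : pySubset b t <;> simp [h]

theorem goA_eq (t : List Int) :
    ∀ (bs : List (List Int)) (i : Int) (subset : Option Int),
      goA t bs i subset =
        match firstExact t bs i with
        | some j => some j
        | none => lastF t bs i subset := by
  intro bs
  induction bs with
  | nil => intro i subset; simp [goA, firstExact, lastF]
  | cons b rest ih =>
    intro i subset
    by_cases he : pySetEq b t
    · simp [goA, firstExact, he]
    · by_cases hs : pySubset b t <;>
        simp [goA, firstExact, lastF, he, hs, ih]

-- ===== VERDICT (by name: the statement is the Claim_ definition above) =====
theorem generated_properties_evaluation_spec : Claim_equal_generated_properties_evaluation := by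
  intro beliefs bps _ _
  unfold Spec_generated_properties_evaluation generated_properties_evaluation generated_properties_evaluation_alt
  rw [goA_eq]
  cases hf : firstExact beliefs (getB bps) 0 with
  | some j => simp [hf]
  | none =>
    simp only [hf]
    rw [lastF_eq_backScan]
    have : (0 : Int) + ((getB bps).length : Int) - 1 = ((getB bps).length : Int) - 1 := by ring
    rw [this]
    cases backScan beliefs (getB bps).reverse (((getB bps).length : Int) - 1) <;> simp [hf]
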